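-- pv_equiv track=rewrite | github.com/sevagh/Scriptorium | scriptorium/ocr.py | sanitize_word
-- ===== SOURCE A (Python) =====
-- import unicodedata
--
-- def sanitize_word(word: str) -> str:
--     left_slice = 0
--     while left_slice < len(word) and unicodedata.category(word[left_slice])[0] != "L":
--         left_slice += 1
--     right_slice = -1
--     while (
--         right_slice >= -len(word) and unicodedata.category(word[right_slice])[0] != "L"
--     ):
--         right_slice -= 1
--     if right_slice == -1:
--         return word[left_slice:]
--     else:
--         return word[left_slice : right_slice + 1]
-- ===== SOURCE B (Python) =====
-- import unicodedata
--
--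
-- def sanitize_word(word: str) -> str:
--     # One full left-to-right pass collecting letter positions, then a single slice.
--     idx = [i for i, c in enumerate(word) if unicodedata.category(c)[0] == "L"]
--     if not idx:
--         return ""
--     return word[idx[0] : idx[-1] + 1]
-- ===== Notes on version B (the rewrite author's own statement) =====
-- stated objective: simpler
-- what changed: Replaces A's two end-trimming while-loops with negative-index arithmetic by one full pass collecting letter indices followed by a single slice from the first to the last letter.
import Mathlib
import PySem

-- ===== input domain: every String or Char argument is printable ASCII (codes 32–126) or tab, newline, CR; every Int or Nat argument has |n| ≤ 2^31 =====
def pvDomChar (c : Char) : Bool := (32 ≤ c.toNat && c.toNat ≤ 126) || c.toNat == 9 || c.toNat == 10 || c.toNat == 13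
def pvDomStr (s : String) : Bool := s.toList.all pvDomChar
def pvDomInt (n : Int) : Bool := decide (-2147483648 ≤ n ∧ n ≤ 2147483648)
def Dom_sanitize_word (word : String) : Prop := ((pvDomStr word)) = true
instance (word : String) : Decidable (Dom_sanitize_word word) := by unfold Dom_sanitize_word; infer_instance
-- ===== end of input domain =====

-- B replaces A's two end-trimming while-loops by one pass collecting letter indices plus a single slice (objective: simpler).


-- ===== PORT A =====
-- unicodedata.category(c)[0] == 'L'  ⟺  c.isAlpha — exact on the printable-ASCII domain.
def pvIsLetter (c : Char) : Bool := c.isAlpha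

-- while left_slice < len(word) and not letter(word[left_slice]): left_slice += 1
def pvLeftScan : List Char → Nat
  | [] => 0
  | c :: rest => if pvIsLetter c then 0 else pvLeftScan rest + 1

-- while right_slice >= -len(word) and not letter(word[right_slice]): right_slice -= 1
-- (the negative-index walk visits the characters of the reversed list)
def pvRightScan : List Char → Int → Int
  | [], r => r
  | c :: rest, r => if pvIsLetter c then r else pvRightScan rest (r - 1)

def sanitize_word (word : String) : String :=
  if pvRightScan word.toList.reverse (-1) = -1 then
    String.ofList (PySem.List.slice word.toList (some (pvLeftScan word.toList)) none)
  else
    String.ofList (PySem.List.slice word.toList (some (pvLeftScan word.toList))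
      (some (pvRightScan word.toList.reverse (-1) + 1)))

-- ===== PORT B =====
-- [i for i, c in enumerate(word) if letter(c)]
def pvLetterIdx (cs : List Char) : List Int :=
  ((PySem.List.enumerate cs 0).filter (fun p => pvIsLetter p.2)).map (·.1)

def sanitize_word_alt (word : String) : String :=
  if pvLetterIdx word.toList = [] then ""
  else String.ofList (PySem.List.slice word.toList (some (pvLetterIdx word.toList).headI)
    (some ((pvLetterIdx word.toList).getLastD 0 + 1)))

-- ===== PRECONDITION & SPEC =====
def Spec_sanitize_word (word : String) (out : String) : Prop := out = sanitize_word_alt word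
instance (word : String) (out : String) : Decidable (Spec_sanitize_word word out) := by unfold Spec_sanitize_word; infer_instance

-- ===== CLAIM (what is proved, stated in full; the proofs are below) =====
def Claim_equal_sanitize_word : Prop := ∀ (word : String), Dom_sanitize_word word → Spec_sanitize_word word (sanitize_word word)

-- ===== LEMMAS AND PROOFS =====

-- number of leading non-letters
def pvLead (cs : List Char) : Nat := (cs.takeWhile (fun c => !pvIsLetter c)).length

theorem pvLeftScan_eq (cs : List Char) : pvLeftScan cs = pvLead cs := by
  induction cs with
  | nil => rfl
  | cons c rest ih =>
    cases h : pvIsLetter c <;>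
      simp [pvLeftScan, pvLead, List.takeWhile_cons, h, ih]

theorem pvRightScan_eq (cs : List Char) :
    ∀ r : Int, pvRightScan cs r = r - pvLead cs := by
  induction cs with
  | nil => intro r; simp [pvRightScan, pvLead]
  | cons c rest ih =>
    intro r
    cases h : pvIsLetter c <;>
      simp [pvRightScan, pvLead, List.takeWhile_cons, h, ih, pvLead] <;> ring

theorem pvLetterIdxAux_nil (cs : List Char) (s : Int) :
    (((PySem.List.enumerate cs s).filter (fun p => pvIsLetter p.2)).map (·.1)) = [] ↔
      cs.all (fun c => !pvIsLetter c) = true := by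
  induction cs generalizing s with
  | nil => simp [PySem.List.enumerate_nil]
  | cons c rest ih =>
    rw [PySem.List.enumerate_cons]
    cases h : pvIsLetter c <;> simp [h, List.filter_cons, ih]

theorem pvLetterIdxAux_headI (cs : List Char) (s : Int)
    (hne : (((PySem.List.enumerate cs s).filter (fun p => pvIsLetter p.2)).map (·.1)) ≠ []) :
    (((PySem.List.enumerate cs s).filter (fun p => pvIsLetter p.2)).map (·.1)).headI
      = s + pvLead cs := by
  induction cs generalizing s with
  | nil => simp [PySem.List.enumerate_nil] at hne
  | cons c rest ih =>
    rw [PySem.List.enumerate_cons] at *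
    cases h : pvIsLetter c with
    | true => simp [List.filter_cons, h, pvLead, List.takeWhile_cons]
    | false =>
      simp only [List.filter_cons, h, if_neg Bool.false_ne_true] at hne ⊢
      rw [ih (s+1) hne]
      simp [pvLead, List.takeWhile_cons, h]
      ring

theorem pvLead_append_letter_all (l : List Char) (c : Char)
    (h : ∀ x ∈ l, pvIsLetter x = false) (hc : pvIsLetter c = true) :
    pvLead (l ++ [c]) = l.length := by
  induction l with
  | nil => simp [pvLead, List.takeWhile_cons, hc]
  | cons a l ih =>
    have ha := h a (by simp)
    have := ih (fun x hx => h x (by simp [hx]))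
    simp only [pvLead, List.cons_append, List.takeWhile_cons, ha] at this ⊢
    simp only [Bool.not_false, if_true, List.length_cons]
    omega

theorem pvLead_append_of_letter (l₁ l₂ : List Char)
    (h : ¬ l₁.all (fun c => !pvIsLetter c) = true) :
    pvLead (l₁ ++ l₂) = pvLead l₁ := by
  induction l₁ with
  | nil => simp at h
  | cons a l ih =>
    by_cases ha : pvIsLetter a
    · simp [pvLead, List.takeWhile_cons, ha]
    · have h' : ¬ l.all (fun c => !pvIsLetter c) = true := by
        simpa [List.all_cons, ha] using h
      have hrec := ih h'
      simp only [pvLead, List.cons_append, List.takeWhile_cons, ha] at hrec ⊢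
      simp only [Bool.not_false, if_true, List.length_cons]
      omega

theorem pvLetterIdxAux_last (cs : List Char) :
    ∀ (s d : Int),
      (((PySem.List.enumerate cs s).filter (fun p => pvIsLetter p.2)).map (·.1)) ≠ [] →
      (((PySem.List.enumerate cs s).filter (fun p => pvIsLetter p.2)).map (·.1)).getLastD d
        = s + cs.length - 1 - pvLead cs.reverse := by
  induction cs with
  | nil => intro s d hne; simp [PySem.List.enumerate_nil] at hne
  | cons c rest ih =>
    intro s d hne
    rw [PySem.List.enumerate_cons] at hne ⊢
    by_cases hrest :
        (((PySem.List.enumerate rest (s+1)).filter (fun p => pvIsLetter p.2)).map (·.1)) = []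
    · have hallrest : rest.all (fun c => !pvIsLetter c) = true :=
        (pvLetterIdxAux_nil rest (s+1)).mp hrest
      cases hc : pvIsLetter c with
      | false => exact absurd (by simp [List.filter_cons, hc, hrest]) hne
      | true =>
        have hmem : ∀ x ∈ rest.reverse, pvIsLetter x = false := by
          intro x hx
          have := (List.all_eq_true.mp hallrest) x (List.mem_reverse.mp hx)
          simpa using this
        have hlead : pvLead (c :: rest).reverse = rest.length := by
          rw [List.reverse_cons, pvLead_append_letter_all rest.reverse c hmem hc,
            List.length_reverse]
        have hgl : List.filter (fun p => pvIsLetter p.2) ((s, c) :: PySem.List.enumerate rest (s+1))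
            = (s, c) :: List.filter (fun p => pvIsLetter p.2) (PySem.List.enumerate rest (s+1)) := by
          simp [List.filter_cons, hc]
        rw [hgl, List.map_cons, hrest]
        have hone : ([(s, c).1] : List Int).getLastD d = s := by simp
        rw [hone, hlead]
        simp only [List.length_cons]
        push_cast
        ring
    · have hletters : ¬ rest.all (fun c => !pvIsLetter c) = true :=
        fun h => hrest ((pvLetterIdxAux_nil rest (s+1)).mpr h)
      have hlead : pvLead (c :: rest).reverse = pvLead rest.reverse := by
        rw [List.reverse_cons]
        apply pvLead_append_of_letter
        intro hcon
        apply hletters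
        rw [List.all_eq_true] at hcon ⊢
        intro x hx
        exact hcon x (List.mem_reverse.mpr hx)
      cases hc : pvIsLetter c with
      | true =>
        have hgl : List.filter (fun p => pvIsLetter p.2) ((s, c) :: PySem.List.enumerate rest (s+1))
            = (s, c) :: List.filter (fun p => pvIsLetter p.2) (PySem.List.enumerate rest (s+1)) := by
          simp [List.filter_cons, hc]
        rw [hgl, List.map_cons, List.getLastD_cons, ih (s+1) ((s, c).1) hrest, hlead]
        simp only [List.length_cons]
        push_cast
        ring
      | false =>
        have hgl : List.filter (fun p => pvIsLetter p.2) ((s, c) :: PySem.List.enumerate rest (s+1))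
            = List.filter (fun p => pvIsLetter p.2) (PySem.List.enumerate rest (s+1)) := by
          simp [List.filter_cons, hc]
        rw [hgl, ih (s+1) d hrest, hlead]
        simp only [List.length_cons]
        push_cast
        ring

theorem pvLead_lt_of_letter (cs : List Char)
    (h : ¬ cs.all (fun c => !pvIsLetter c) = true) :
    pvLead cs < cs.length := by
  induction cs with
  | nil => simp at h
  | cons c rest ih =>
    by_cases hc : pvIsLetter c
    · simp [pvLead, List.takeWhile_cons, hc]
    · have h' : ¬ rest.all (fun c => !pvIsLetter c) = true := by
        simp [List.all_cons, hc] at h; simpa using h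
      have := ih h'
      simp only [pvLead, List.takeWhile_cons, hc] at this ⊢
      simp only [Bool.not_false, if_true, List.length_cons]
      omega

theorem pvSliceEmpty (cs : List Char) :
    PySem.List.slice cs (some (cs.length : Int)) (some (-(cs.length : Int))) = [] := by
  rcases Nat.eq_zero_or_pos cs.length with h | h
  · rw [List.length_eq_zero_iff] at h; subst h; rfl
  · have h1 : ¬ ((cs.length : Int) < 0) := by omega
    have h2 : (-(cs.length : Int) < 0) := by omega
    have h3 : ¬ ((cs.length : Int) + -(cs.length : Int) < 0) := by omega
    simp only [PySem.List.slice, PySem.List.clampIdx, if_neg h1, if_pos h2, if_neg h3]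
    have h4 : ((cs.length : Int) + -(cs.length : Int)) = 0 := by ring
    rw [h4]
    simp

theorem pvClampCast (n k : Nat) (hk : k ≤ n) :
    PySem.List.clampIdx n ((k : Int)) = k := by
  have h1 : ¬ ((k : Int) < 0) := by omega
  simp only [PySem.List.clampIdx, if_neg h1, Int.toNat_natCast]
  omega

-- ===== VERDICT (by name: the statement is the Claim_ definition above) =====
theorem sanitize_word_spec : Claim_equal_sanitize_word := by
  intro word _
  show sanitize_word word = sanitize_word_alt word
  unfold sanitize_word sanitize_word_alt pvLetterIdx
  simp only [pvLeftScan_eq, pvRightScan_eq]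
  generalize word.toList = cs
  by_cases hall : cs.all (fun c => !pvIsLetter c) = true
  · -- no letters anywhere: both sides are ""
    have hidx : (((PySem.List.enumerate cs 0).filter (fun p => pvIsLetter p.2)).map (·.1)) = [] :=
      (pvLetterIdxAux_nil cs 0).mpr hall
    have hlead : pvLead cs = cs.length := by
      unfold pvLead
      rw [List.takeWhile_eq_self_iff.mpr (List.all_eq_true.mp hall)]
    have hleadr : pvLead cs.reverse = cs.length := by
      unfold pvLead
      rw [List.takeWhile_eq_self_iff.mpr
        (fun x hx => (List.all_eq_true.mp hall) x (List.mem_reverse.mp hx)), List.length_reverse]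
    rw [hidx, if_pos rfl, hlead, hleadr]
    rcases Nat.eq_zero_or_pos cs.length with h0 | h0
    · rw [List.length_eq_zero_iff] at h0; subst h0; decide
    · have hne : (-1 : Int) - (cs.length : Int) ≠ -1 := by omega
      rw [if_neg hne]
      have e1 : (-1 : Int) - (cs.length : Int) + 1 = -(cs.length : Int) := by ring
      rw [e1, pvSliceEmpty]
  · -- at least one letter
    have hne : (((PySem.List.enumerate cs 0).filter (fun p => pvIsLetter p.2)).map (·.1)) ≠ [] :=
      fun h => hall ((pvLetterIdxAux_nil cs 0).mp h)
    have hrev : ¬ cs.reverse.all (fun c => !pvIsLetter c) = true := by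
      intro hcon
      apply hall
      rw [List.all_eq_true] at hcon ⊢
      intro x hx
      exact hcon x (List.mem_reverse.mpr hx)
    have hl : pvLead cs < cs.length := pvLead_lt_of_letter cs hall
    have ht : pvLead cs.reverse < cs.length := by
      have := pvLead_lt_of_letter cs.reverse hrev
      simpa using this
    have hhead := pvLetterIdxAux_headI cs 0 hne
    have hlast := pvLetterIdxAux_last cs 0 0 hne
    rw [if_neg hne, hhead, hlast]
    have e0 : (0 : Int) + (pvLead cs : Int) = (pvLead cs : Int) := by ring
    rw [e0]
    by_cases ht0 : pvLead cs.reverse = 0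
    · -- no trailing non-letters: A takes word[left:], B stops at len(word)
      have hr : (-1 : Int) - (pvLead cs.reverse : Int) = -1 := by rw [ht0]; ring
      rw [if_pos hr]
      have e2 : (0 : Int) + (cs.length : Int) - 1 - (pvLead cs.reverse : Int) + 1
          = (cs.length : Int) := by rw [ht0]; push_cast; ring
      rw [e2]
      simp only [PySem.List.slice, pvClampCast cs.length (pvLead cs) hl.le,
        pvClampCast cs.length cs.length (le_refl _)]
    · -- trailing non-letters: A's stop -t equals B's stop n - t
      have htpos : 0 < pvLead cs.reverse := Nat.pos_of_ne_zero ht0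
      have hr : (-1 : Int) - (pvLead cs.reverse : Int) ≠ -1 := by omega
      rw [if_neg hr]
      have e3 : (-1 : Int) - (pvLead cs.reverse : Int) + 1 = -(pvLead cs.reverse : Int) := by ring
      have e4 : (0 : Int) + (cs.length : Int) - 1 - (pvLead cs.reverse : Int) + 1
          = ((cs.length - pvLead cs.reverse : Nat) : Int) := by
        push_cast [Nat.cast_sub ht.le]
        ring
      rw [e3, e4]
      simp only [PySem.List.slice,
        PySem.List.clampIdx_neg_natCast cs.length (pvLead cs.reverse) htpos,
        pvClampCast cs.length (cs.length - pvLead cs.reverse) (Nat.sub_le _ _)]
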